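-- pv_equiv track=rewrite | github.com/multimodal-interpretability/FIND | src/make_functions/make_strings/string_functions.py | advance_by_character_order
-- ===== SOURCE A (Python) =====
-- def advance_by_character_order(string, inx):
--     if len(string)<inx+1:
--         return string
--     char_inx = string[inx].lower()
--     order = ord(char_inx) - ord('a')
--
--     advanced_string = ""
--     for char in string:
--         if char.isalpha():
--             new_char = chr((ord(char.lower()) - ord('a') + order) % 26 + ord('a'))
--         else:
--             new_char = char
--         advanced_string += new_char
--     return advanced_string
-- ===== SOURCE B (Python) =====
-- def advance_by_character_order(string, inx):
--     if len(string) < inx + 1: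
--         return string
--     order = ord(string[inx].lower()) - ord('a')
--     # group positions by distinct character, then compute each distinct
--     # character's image once and scatter it into a preallocated output
--     positions = {}
--     for i, c in enumerate(string):
--         positions.setdefault(c, []).append(i)
--     out = [''] * len(string)
--     for c, idxs in positions.items():
--         if c.isalpha():
--             t = chr((ord(c.lower()) - ord('a') + order) % 26 + ord('a'))
--         else:
--             t = c
--         for i in idxs:
--             out[i] = t
--     return ''.join(out)
-- ===== Notes on version B (the rewrite author's own statement) =====
-- stated objective: alternative
-- what changed: B replaces A's per-character branch-and-append loop by a group-by/scatter algorithm: one pass indexes the positions of every distinct character, each distinct character's shifted image is computed exactly once, and the images are scattered into a preallocated output buffer.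
-- outside the precondition, e.g. on advance_by_character_order('abc', -5): A raises IndexError, B raises IndexError
import Mathlib
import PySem

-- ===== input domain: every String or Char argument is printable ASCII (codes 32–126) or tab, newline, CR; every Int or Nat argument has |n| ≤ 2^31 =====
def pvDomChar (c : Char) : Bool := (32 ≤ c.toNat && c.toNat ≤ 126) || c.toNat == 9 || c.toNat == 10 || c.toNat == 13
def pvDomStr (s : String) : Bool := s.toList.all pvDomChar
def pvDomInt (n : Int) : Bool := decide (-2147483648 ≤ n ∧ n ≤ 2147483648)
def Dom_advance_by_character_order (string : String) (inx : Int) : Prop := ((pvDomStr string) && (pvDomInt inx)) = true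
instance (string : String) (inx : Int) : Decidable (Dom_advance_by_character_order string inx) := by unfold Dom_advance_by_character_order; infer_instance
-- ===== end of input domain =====

-- B groups the positions of each distinct character once, computes each distinct
-- character's shifted image once, and scatters it into a preallocated output;
-- the shift arithmetic runs once per distinct character, not once per position.

-- ===== PORT A =====
def advance_by_character_order (string : String) (inx : Int) : String :=
  if PySem.Str.len string < inx + 1 then string
  else
    match PySem.Str.pyGet? string inx with
    | none => ""   -- Python raises IndexError here; excluded by Pre_
    | some ch =>
      let order : Int := ((PySem.Chars.lowerChar ch).toNat : Int) - 97
      let step : List Char → Char → List Char := fun acc c =>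
        let newChar : Char :=
          if PySem.Chars.isalpha c then
            Char.ofNat ((PySem.Int.mod (((PySem.Chars.lowerChar c).toNat : Int) - 97 + order) 26 + 97).toNat)
          else c
        acc ++ [newChar]
      String.ofList (string.toList.foldl step [])

-- ===== PORT B =====
def advance_by_character_order_alt (string : String) (inx : Int) : String :=
  if PySem.Str.len string < inx + 1 then string
  else
    match PySem.Str.pyGet? string inx with
    | none => ""   -- Python raises IndexError here; excluded by Pre_
    | some ch =>
      let order : Int := ((PySem.Chars.lowerChar ch).toNat : Int) - 97
      let s := string.toList
      -- positions.setdefault(c, []).append(i): dict entry c becomes get(c,[]) ++ [i]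
      let positions : PySem.Dict Char (List Int) :=
        (PySem.List.enumerate s 0).foldl
          (fun d p => d.modify p.2 [] (· ++ [p.1])) PySem.Dict.empty
      -- out = [''] * len(string); entries are overwritten by one-char strings
      let out0 : List (List Char) := List.replicate s.length []
      let out := positions.items.foldl
        (fun acc cv =>
          let t : Char :=
            if PySem.Chars.isalpha cv.1 then
              Char.ofNat ((PySem.Int.mod (((PySem.Chars.lowerChar cv.1).toNat : Int) - 97 + order) 26 + 97).toNat)
            else cv.1
          cv.2.foldl (fun a i => PySem.List.pySetD a i [t]) acc) out0
      String.ofList out.flatten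

-- ===== PRECONDITION & SPEC =====
-- Pre_ excludes exactly the inputs where Python's string[inx] raises IndexError
-- (inx below -len while the length guard does not fire).
def Pre_advance_by_character_order (string : String) (inx : Int) : Prop :=
  PySem.Str.len string < inx + 1 ∨ -(PySem.Str.len string) ≤ inx
instance (string : String) (inx : Int) : Decidable (Pre_advance_by_character_order string inx) := by unfold Pre_advance_by_character_order; infer_instance
def pvWitness_advance_by_character_order : String × Int := ("Hello, World!", 1)

def Spec_advance_by_character_order (string : String) (inx : Int) (out : String) : Prop := out = advance_by_character_order_alt string inx
instance (string : String) (inx : Int) (out : String) : Decidable (Spec_advance_by_character_order string inx out) := by unfold Spec_advance_by_character_order; infer_instance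

-- ===== CLAIM (what is proved, stated in full; the proofs are below) =====
def Claim_equal_advance_by_character_order : Prop := ∀ (string : String) (inx : Int), Dom_advance_by_character_order string inx → Pre_advance_by_character_order string inx → Spec_advance_by_character_order string inx (advance_by_character_order string inx)

-- ===== LEMMAS AND PROOFS =====

-- the index list B's positions dict stores for character c
def pvIdx (s : List Char) (c : Char) : List Int :=
  (((PySem.List.enumerate s 0).map Prod.swap).filter (fun p => p.1 == c)).map (·.2)

theorem pvIdx_mem (s : List Char) (c : Char) (j : Int) :
    j ∈ pvIdx s c ↔ ∃ (k : Nat) (_ : k < s.length), j = (k : Int) ∧ s[k] = c := by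
  unfold pvIdx
  constructor
  · intro h
    simp only [List.mem_map, List.mem_filter] at h
    obtain ⟨p, ⟨hp, hfst⟩, rfl⟩ := h
    obtain ⟨q, hq, rfl⟩ := hp
    obtain ⟨k, hk, rfl⟩ := (PySem.List.mem_enumerate_iff s 0 q).mp hq
    exact ⟨k, hk, by simp, by simpa [beq_iff_eq] using hfst⟩
  · rintro ⟨k, hk, rfl, rfl⟩
    simp only [List.mem_map, List.mem_filter]
    exact ⟨((0 : Int) + k, s[k]).swap,
      ⟨⟨((0 : Int) + k, s[k]), (PySem.List.mem_enumerate_iff s 0 _).mpr ⟨k, hk, rfl⟩, rfl⟩,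
        by simp⟩, by simp⟩

-- inner scatter loop: length is preserved
theorem pv_inner_len (L : List Int) (v : List Char) (a : List (List Char)) :
    (L.foldl (fun a i => PySem.List.pySetD a i v) a).length = a.length := by
  induction L generalizing a with
  | nil => rfl
  | cons i L ih => simp [ih, PySem.List.length_pySetD]

-- inner scatter loop: entry j becomes v iff j occurs among the written indices
theorem pv_inner_get (L : List Int) (v : List Char) (a : List (List Char))
    (hL : ∀ i ∈ L, 0 ≤ i ∧ i < (a.length : Int)) (j : Nat) :
    (L.foldl (fun a i => PySem.List.pySetD a i v) a)[j]? =
      if (j : Int) ∈ L then some v else a[j]? := by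
  induction L generalizing a with
  | nil => simp
  | cons i L ih =>
    have hi := hL i List.mem_cons_self
    have h0 := hi.1
    have h1 := hi.2
    simp only [List.foldl_cons]
    rw [PySem.List.pySetD_of_nonneg a _ h0,
      ih _ (by intro x hx; simpa [List.length_set] using hL x (List.mem_cons_of_mem _ hx))]
    by_cases hmem : (j : Int) ∈ L
    · simp [hmem]
    · rw [if_neg hmem, List.getElem?_set]
      by_cases hji : (j : Int) = i
      · have e1 : i.toNat = j := by omega
        have e2 : j < a.length := by omega
        simp [e1, e2, hji]
      · have e1 : ¬ i.toNat = j := by omega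
        simp [e1, hji, hmem]

-- outer scatter loop: length is preserved
theorem pv_outer_len (s : List Char) (val : Char → List Char) (C : List Char)
    (a : List (List Char)) :
    (C.foldl (fun acc c => (pvIdx s c).foldl
        (fun x i => PySem.List.pySetD x i (val c)) acc) a).length = a.length := by
  induction C generalizing a with
  | nil => rfl
  | cons c C ih => simp only [List.foldl_cons]; rw [ih, pv_inner_len]

-- outer scatter loop: entry j holds val s[j] once its character was processed
theorem pv_outer_get (s : List Char) (val : Char → List Char) (C : List Char) :
    ∀ (a : List (List Char)), a.length = s.length → ∀ (j : Nat) (hj : j < s.length),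
    (C.foldl (fun acc c => (pvIdx s c).foldl
        (fun x i => PySem.List.pySetD x i (val c)) acc) a)[j]? =
      if s[j] ∈ C then some (val s[j]) else a[j]? := by
  induction C with
  | nil => intro a _ j hj; simp
  | cons c C ih =>
    intro a hlen j hj
    have hbound : ∀ i ∈ pvIdx s c, 0 ≤ i ∧ i < (a.length : Int) := by
      intro i hi
      obtain ⟨k, hk, rfl, _⟩ := (pvIdx_mem s c i).mp hi
      constructor <;> omega
    simp only [List.foldl_cons]
    rw [ih _ (by rw [pv_inner_len, hlen]) j hj]
    have hidx : ((j : Int) ∈ pvIdx s c) ↔ s[j] = c := by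
      rw [pvIdx_mem]
      constructor
      · rintro ⟨k, hk, hjk, rfl⟩
        have : k = j := by omega
        subst this; rfl
      · intro h; exact ⟨j, hj, rfl, h⟩
    by_cases hC : s[j] ∈ C
    · simp [hC]
    · rw [if_neg hC, pv_inner_get _ _ _ hbound]
      by_cases hc : s[j] = c
      · rw [if_pos (hidx.mpr hc), if_pos (by simp [hc])]
        rw [hc]
      · rw [if_neg (fun h => hc (hidx.mp h)), if_neg (by simp [hc, hC])]

-- flattening singleton lists is the plain map
theorem pv_flatten_singleton (l : List Char) (f : Char → Char) :
    (l.map (fun c => [f c])).flatten = l.map f := by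
  induction l with
  | nil => rfl
  | cons x xs ih => simp [ih]

-- B's whole core (group positions, compute each image once, scatter, join)
-- equals the pointwise map over the string
theorem pv_B_core (s : List Char) (f : Char → Char) :
    (((PySem.List.enumerate s 0).foldl
        (fun d p => d.modify p.2 [] (· ++ [p.1]))
        (PySem.Dict.empty : PySem.Dict Char (List Int))).items.foldl
      (fun acc cv => cv.2.foldl (fun a i => PySem.List.pySetD a i [f cv.1]) acc)
      (List.replicate s.length ([] : List Char))).flatten
    = s.map f := by
  have hnodup : ((PySem.List.enumerate s 0).foldl
      (fun d p => d.modify p.2 [] (· ++ [p.1]))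
      (PySem.Dict.empty : PySem.Dict Char (List Int))).keys.Nodup :=
    PySem.Dict.nodup_keys_foldl_modify_key (PySem.List.enumerate s 0)
      (fun p : Int × Char => p.2) ([] : List Int) (fun _ p => (· ++ [p.1])) PySem.Dict.empty
      (by simp [PySem.Dict.keys_empty])
  have hkeys : ((PySem.List.enumerate s 0).foldl
      (fun d p => d.modify p.2 [] (· ++ [p.1]))
      (PySem.Dict.empty : PySem.Dict Char (List Int))).keys = PySem.Set.ofList s := by
    have h1 := PySem.Dict.keys_foldl_modify_key (PySem.List.enumerate s 0)
      (fun p : Int × Char => p.2) ([] : List Int)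
      (fun _ p => (· ++ [p.1])) (PySem.Dict.empty)
    simp only [PySem.Dict.keys_empty, PySem.List.map_snd_enumerate] at h1
    rw [h1, PySem.Set.ofList_eq_foldl]
    rfl
  have hgetD : ∀ c, ((PySem.List.enumerate s 0).foldl
      (fun d p => d.modify p.2 [] (· ++ [p.1]))
      (PySem.Dict.empty : PySem.Dict Char (List Int))).getD c [] = pvIdx s c := by
    intro c
    rw [show (List.foldl (fun d p => d.modify p.2 [] (· ++ [p.1]))
        (PySem.Dict.empty : PySem.Dict Char (List Int)) (PySem.List.enumerate s 0))
      = ((PySem.List.enumerate s 0).map Prod.swap).foldl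
          (fun d p => d.modify p.1 [] (· ++ [p.2])) PySem.Dict.empty from by
      rw [List.foldl_map]; rfl]
    rw [PySem.Dict.getD_foldl_modify_append, PySem.Dict.getD_empty]
    rfl
  have hitems : ((PySem.List.enumerate s 0).foldl
      (fun d p => d.modify p.2 [] (· ++ [p.1]))
      (PySem.Dict.empty : PySem.Dict Char (List Int))).items
      = (PySem.Set.ofList s).map (fun c => (c, pvIdx s c)) := by
    rw [PySem.Dict.items_eq_map_keys _ hnodup ([] : List Int), hkeys]
    exact List.map_congr_left (fun c _ => by rw [hgetD])
  rw [hitems, List.foldl_map]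
  have hout : ((PySem.Set.ofList s).foldl
      (fun acc c => (pvIdx s c).foldl (fun a i => PySem.List.pySetD a i [f c]) acc)
      (List.replicate s.length ([] : List Char)))
      = s.map (fun c => [f c]) := by
    apply List.ext_getElem?
    intro j
    by_cases hj : j < s.length
    · rw [pv_outer_get s (fun c => [f c]) _ _ (by simp) j hj,
        if_pos ((PySem.Set.mem_ofList s _).mpr (List.getElem_mem hj)),
        List.getElem?_map, List.getElem?_eq_getElem hj]
      rfl
    · rw [List.getElem?_eq_none (by rw [pv_outer_len]; simpa using Nat.le_of_not_lt hj),
        List.getElem?_eq_none (by simpa using Nat.le_of_not_lt hj)]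
  rw [hout, pv_flatten_singleton]

-- ===== VERDICT (by name: the statement is the Claim_ definition above) =====
theorem advance_by_character_order_spec : Claim_equal_advance_by_character_order := by
  intro string inx _ _
  unfold Spec_advance_by_character_order advance_by_character_order advance_by_character_order_alt
  by_cases hg : PySem.Str.len string < inx + 1
  · rw [if_pos hg, if_pos hg]
  · rw [if_neg hg, if_neg hg]
    cases hget : PySem.Str.pyGet? string inx with
    | none => rfl
    | some ch =>
      simp only []
      congr 1
      rw [PySem.List.foldl_append_singleton_eq_map
        (f := fun c => if PySem.Chars.isalpha c then
          Char.ofNat ((PySem.Int.mod (((PySem.Chars.lowerChar c).toNat : Int) - 97 +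
            (((PySem.Chars.lowerChar ch).toNat : Int) - 97)) 26 + 97).toNat)
        else c), List.nil_append]
      exact (pv_B_core string.toList _).symm
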